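-- pv_equiv track=rewrite | github.com/goodarzi64/GHI_Forecasting | src/cv_splits.py | make_expanding_folds
-- ===== SOURCE A (Python) =====
-- from typing import Dict, List, Sequence, Tuple
--
-- def make_expanding_folds(
--     T: int,
--     train_start: int,
--     first_train_end: int,
--     val_window: int,
--     n_folds: int,
-- ) -> List[Dict[str, Tuple[int, int]]]:
--     """
--     Build expanding-window CV folds.
--
--     Args:
--         T: total time length
--         train_start: usually 0
--         first_train_end: index where first train ends (exclusive)
--         val_window: number of timesteps for each validation fold
--         n_folds: how many folds to generate
--
--     Returns:
--         List of dicts with keys: "train_slice", "val_slice"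
--     """
--     folds: List[Dict[str, Tuple[int, int]]] = []
--
--     train_end = first_train_end
--     val_start = train_end
--     for _ in range(n_folds):
--         val_end = min(val_start + val_window, T)
--         if val_end <= val_start:
--             break
--
--         folds.append(
--             {
--                 "train_slice": (train_start, train_end),
--                 "val_slice": (val_start, val_end),
--             }
--         )
--
--         # expand training to include the validation just used
--         train_end = val_end
--         val_start = val_end
--
--     return folds
-- ===== SOURCE B (Python) =====
-- def make_expanding_folds(T, train_start, first_train_end, val_window, n_folds):
--     """Closed-form fold construction: compute the number of valid folds by
--     ceiling division, then build each fold directly from its index."""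
--     if val_window <= 0:
--         return []
--     n_eff = min(n_folds, -((first_train_end - T) // val_window))
--     return [
--         {
--             "train_slice": (train_start, first_train_end + i * val_window),
--             "val_slice": (
--                 first_train_end + i * val_window,
--                 min(first_train_end + (i + 1) * val_window, T),
--             ),
--         }
--         for i in range(n_eff)
--     ]
-- ===== Notes on version B (the rewrite author's own statement) =====
-- stated objective: alternative
-- what changed: B replaces A's loop with mutable train_end/val_start state and a mid-loop break by a closed-form computation: the number of valid folds is obtained by ceiling division and each fold is built directly from its index in a comprehension.
import Mathlib
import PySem

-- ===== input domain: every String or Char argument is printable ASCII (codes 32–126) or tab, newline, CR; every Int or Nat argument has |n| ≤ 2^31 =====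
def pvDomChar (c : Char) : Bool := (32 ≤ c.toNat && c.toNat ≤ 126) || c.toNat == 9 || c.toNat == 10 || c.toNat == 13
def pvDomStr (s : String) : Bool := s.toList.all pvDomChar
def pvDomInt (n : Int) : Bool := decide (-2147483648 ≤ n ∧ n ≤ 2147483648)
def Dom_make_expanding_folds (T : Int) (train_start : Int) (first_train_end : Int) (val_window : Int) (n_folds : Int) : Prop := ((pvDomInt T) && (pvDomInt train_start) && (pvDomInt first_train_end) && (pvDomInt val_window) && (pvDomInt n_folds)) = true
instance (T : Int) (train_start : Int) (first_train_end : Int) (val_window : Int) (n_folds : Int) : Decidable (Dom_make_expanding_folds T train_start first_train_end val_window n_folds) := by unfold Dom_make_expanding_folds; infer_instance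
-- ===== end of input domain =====

-- B replaces A's accumulating loop state by a closed-form fold count (ceiling
-- division) and builds each fold directly from its index (objective: alternative).

-- ===== PORT A =====
-- the for-loop with break: structural recursion on the remaining iteration count
def pvLoopA (T : Int) (train_start : Int) (val_window : Int) :
    Nat → Int → Int → List (List (String × Int × Int))
  | 0, _, _ => []
  | Nat.succ k, train_end, val_start =>
    let val_end := min (val_start + val_window) T
    if val_end ≤ val_start then []
    else [("train_slice", (train_start, train_end)), ("val_slice", (val_start, val_end))] ::
      pvLoopA T train_start val_window k val_end val_end

def make_expanding_folds (T : Int) (train_start : Int) (first_train_end : Int) (val_window : Int) (n_folds : Int) : List (List (String × Int × Int)) :=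
  pvLoopA T train_start val_window n_folds.toNat first_train_end first_train_end

-- ===== PORT B =====
def make_expanding_folds_alt (T : Int) (train_start : Int) (first_train_end : Int) (val_window : Int) (n_folds : Int) : List (List (String × Int × Int)) :=
  if val_window ≤ 0 then []
  else
    let n_eff := min n_folds (-(PySem.Int.floordiv (first_train_end - T) val_window))
    (PySem.List.pyRange 0 n_eff 1).map (fun i =>
      [("train_slice", (train_start, first_train_end + i * val_window)),
       ("val_slice", (first_train_end + i * val_window,
          min (first_train_end + (i + 1) * val_window) T))])

-- ===== PRECONDITION & SPEC =====
def Spec_make_expanding_folds (T : Int) (train_start : Int) (first_train_end : Int) (val_window : Int) (n_folds : Int) (out : List (List (String × Int × Int))) : Prop := out = make_expanding_folds_alt T train_start first_train_end val_window n_folds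
instance (T : Int) (train_start : Int) (first_train_end : Int) (val_window : Int) (n_folds : Int) (out : List (List (String × Int × Int))) : Decidable (Spec_make_expanding_folds T train_start first_train_end val_window n_folds out) := by unfold Spec_make_expanding_folds; infer_instance

-- ===== CLAIM (what is proved, stated in full; the proofs are below) =====
def Claim_equal_make_expanding_folds : Prop := ∀ (T : Int) (train_start : Int) (first_train_end : Int) (val_window : Int) (n_folds : Int), Dom_make_expanding_folds T train_start first_train_end val_window n_folds → Spec_make_expanding_folds T train_start first_train_end val_window n_folds (make_expanding_folds T train_start first_train_end val_window n_folds)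

-- ===== LEMMAS AND PROOFS =====

-- the fold built at index i
def pvFoldAt (T : Int) (train_start : Int) (fte : Int) (vw : Int) (i : Int) : List (String × Int × Int) :=
  [("train_slice", (train_start, fte + i * vw)),
   ("val_slice", (fte + i * vw, min (fte + (i + 1) * vw) T))]

-- A returns nothing once val_start has reached T
theorem pvLoopA_stop (T ts vw v : Int) (hv : T ≤ v) :
    ∀ k, pvLoopA T ts vw k v v = [] := by
  intro k
  cases k with
  | zero => rfl
  | succ k =>
    simp only [pvLoopA]
    rw [if_pos (le_trans (min_le_right _ _) hv)]

-- A returns nothing when val_window ≤ 0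
theorem pvLoopA_nonpos (T ts vw v w : Int) (hvw : vw ≤ 0) :
    ∀ k, pvLoopA T ts vw k w v = [] := by
  intro k
  cases k with
  | zero => rfl
  | succ k =>
    simp only [pvLoopA]
    rw [if_pos (le_trans (min_le_left _ _) (by omega))]

-- threshold: with c = ceil((T - fte)/vw), val_start fte + i*vw has reached T iff c ≤ i
theorem pvThresh (T fte vw : Int) (hvw : 0 < vw) (i : Int) :
    T ≤ fte + i * vw ↔ -(PySem.Int.floordiv (fte - T) vw) ≤ i := by
  set c : Int := -(PySem.Int.floordiv (fte - T) vw) with hc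
  have hceil : (c - 1) * vw < T - fte ∧ T - fte ≤ c * vw := by
    have h := (PySem.Int.neg_floordiv_neg_eq_iff_of_pos (a := T - fte) (b := vw) (q := c) hvw).mp
    have harg : -(T - fte) = fte - T := by ring
    rw [harg] at h
    exact h hc.symm
  constructor
  · intro h
    by_contra hlt
    push Not at hlt
    have hi1 : i ≤ c - 1 := by omega
    have := mul_le_mul_of_nonneg_right hi1 (le_of_lt hvw)
    omega
  · intro h
    have := mul_le_mul_of_nonneg_right h (le_of_lt hvw)
    omega

-- main invariant: A's loop started at index i produces the closed-form folds
theorem pvLoopA_closed (T ts fte vw : Int) (hvw : 0 < vw) :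
    ∀ (k : Nat) (i : Int),
      pvLoopA T ts vw k (fte + i * vw) (fte + i * vw) =
        (List.range (min k (-(PySem.Int.floordiv (fte - T) vw) - i).toNat)).map
          (fun (j : Nat) => pvFoldAt T ts fte vw (i + (j : Int))) := by
  intro k
  induction k with
  | zero => intro i; simp [pvLoopA]
  | succ k ih =>
    intro i
    set c : Int := -(PySem.Int.floordiv (fte - T) vw) with hc
    by_cases hT : T ≤ fte + i * vw
    · have hci : c ≤ i := (pvThresh T fte vw hvw i).mp hT
      rw [pvLoopA_stop T ts vw _ hT]
      have : (c - i).toNat = 0 := by omega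
      simp [this]
    · push Not at hT
      have hci : i < c := by
        by_contra h
        push Not at h
        exact absurd ((pvThresh T fte vw hvw i).mpr h) (by omega)
      simp only [pvLoopA]
      have hnb : ¬ (min (fte + i * vw + vw) T ≤ fte + i * vw) := by
        simp only [not_le, lt_min_iff]; omega
      rw [if_neg hnb]
      have hcnt : (c - i).toNat = (c - (i + 1)).toNat + 1 := by omega
      rw [hcnt, Nat.succ_min_succ, List.range_succ_eq_map, List.map_cons]
      congr 1
      · simp only [pvFoldAt]
        have : fte + (i + (0:Nat)) * vw = fte + i * vw := by push_cast; ring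
        rw [this]
        have : fte + (i + (0:Nat) + 1) * vw = fte + i * vw + vw := by push_cast; ring
        rw [this]
      · by_cases hcl : fte + i * vw + vw ≤ T
        · have hmin : min (fte + i * vw + vw) T = fte + (i + 1) * vw := by
            rw [min_eq_left hcl]; ring
          rw [hmin, ih (i + 1)]
          rw [List.map_map]
          apply List.map_congr_left
          intro j _
          simp only [Function.comp]
          congr 1
          push_cast; ring
        · push Not at hcl
          have hmin : min (fte + i * vw + vw) T = T := by omega
          rw [hmin, pvLoopA_stop T ts vw T le_rfl]
          have hc1 : c ≤ i + 1 :=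
            (pvThresh T fte vw hvw (i + 1)).mp (by nlinarith)
          have : (c - (i + 1)).toNat = 0 := by omega
          simp [this]

-- ===== VERDICT (by name: the statement is the Claim_ definition above) =====
theorem make_expanding_folds_spec : Claim_equal_make_expanding_folds := by
  intro T ts fte vw n _
  unfold Spec_make_expanding_folds make_expanding_folds make_expanding_folds_alt
  by_cases hvw : vw ≤ 0
  · rw [if_pos hvw, pvLoopA_nonpos T ts vw fte fte hvw]
  · push Not at hvw
    rw [if_neg (by omega)]
    have hl := pvLoopA_closed T ts fte vw hvw n.toNat 0
    rw [zero_mul, add_zero] at hl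
    rw [hl]
    simp only [PySem.List.pyRange_one, List.map_map]
    have hlen : min n.toNat (-(PySem.Int.floordiv (fte - T) vw) - 0).toNat
        = (min n (-(PySem.Int.floordiv (fte - T) vw)) - 0).toNat := by omega
    rw [hlen]
    apply List.map_congr_left
    intro j _
    simp only [Function.comp, pvFoldAt]
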